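-- pv_equiv track=rewrite | github.com/duanemalcolm/morphic | morphic/faces.py | dimensions
-- ===== SOURCE A (Python) =====
-- def dimensions(basis):
--     dimensions = 0
--     for base in basis:
--         if base[0] == 'T':
--             dimensions += 2
--         else:
--             dimensions += 1
--     return dimensions
-- ===== SOURCE B (Python) =====
-- def dimensions(basis):
--     n = len(basis)
--     if n == 0:
--         return 0
--     if n == 1:
--         return 2 if basis[0][0] == 'T' else 1
--     mid = n // 2
--     return dimensions(basis[:mid]) + dimensions(basis[mid:])
-- ===== Notes on version B (the rewrite author's own statement) =====
-- stated objective: alternative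
-- what changed: Replaces the left-to-right accumulator loop with a divide-and-conquer recursion: the list is split in half, each half is solved recursively, and the two subtotals are added (base cases: empty list 0, singleton 1 or 2).
import Mathlib
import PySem

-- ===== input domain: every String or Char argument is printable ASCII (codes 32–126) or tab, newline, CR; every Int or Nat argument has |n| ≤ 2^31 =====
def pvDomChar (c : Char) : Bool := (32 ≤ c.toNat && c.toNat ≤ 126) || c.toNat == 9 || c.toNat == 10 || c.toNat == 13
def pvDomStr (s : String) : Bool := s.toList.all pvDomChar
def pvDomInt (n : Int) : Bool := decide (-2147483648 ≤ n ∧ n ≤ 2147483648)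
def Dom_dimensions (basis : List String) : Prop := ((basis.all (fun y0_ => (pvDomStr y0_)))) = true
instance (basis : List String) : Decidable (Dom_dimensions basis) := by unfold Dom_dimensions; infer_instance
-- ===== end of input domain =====

-- B replaces A's accumulator loop by a halving divide-and-conquer recursion; return value only.
-- ===== PORT A =====
def dimensions (basis : List String) : Int :=
  basis.foldl (fun dims base =>
    if PySem.Str.pyGet? base 0 = some 'T' then dims + 2 else dims + 1) 0

-- ===== PORT B =====
-- fuel = basis.length is a totality guard only: the halving recursion's depth never exhausts it
def dimensionsAltGo (fuel : Nat) (basis : List String) : Int :=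
  match fuel with
  | 0 => 0
  | fuel + 1 =>
    if basis.length = 0 then 0
    else if basis.length = 1 then
      -- basis[0][0] == 'T' on a singleton list: basis[0] is its head
      if PySem.Str.pyGet? (basis.headI) 0 = some 'T' then 2 else 1
    else
      let mid := basis.length / 2
      dimensionsAltGo fuel (PySem.List.slice basis none (some (mid : Int))) +
      dimensionsAltGo fuel (PySem.List.slice basis (some (mid : Int)) none)

def dimensions_alt (basis : List String) : Int :=
  dimensionsAltGo basis.length basis

-- ===== PRECONDITION & SPEC =====
-- Pre_ excludes lists containing an empty base string, on which A's base[0] raises IndexError (B raises there too).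
def Pre_dimensions (basis : List String) : Prop := "" ∉ basis
instance (basis : List String) : Decidable (Pre_dimensions basis) := by unfold Pre_dimensions; infer_instance
def pvWitness_dimensions : List String := ["Tx", "y"]
def Spec_dimensions (basis : List String) (out : Int) : Prop := out = dimensions_alt basis
instance (basis : List String) (out : Int) : Decidable (Spec_dimensions basis out) := by unfold Spec_dimensions; infer_instance

-- ===== CLAIM (what is proved, stated in full; the proofs are below) =====
def Claim_equal_dimensions : Prop := ∀ (basis : List String), Dom_dimensions basis → Pre_dimensions basis → Spec_dimensions basis (dimensions basis)

-- ===== LEMMAS AND PROOFS =====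

-- weight of one base, shared characterisation of both ports
def pvWeight (base : String) : Int :=
  if PySem.Str.pyGet? base 0 = some 'T' then 2 else 1

theorem dimensions_foldl (basis : List String) (d : Int) :
    basis.foldl (fun dims base =>
      if PySem.Str.pyGet? base 0 = some 'T' then dims + 2 else dims + 1) d
    = d + (basis.map pvWeight).sum := by
  induction basis generalizing d with
  | nil => simp
  | cons b bs ih =>
    rw [List.foldl_cons, ih]
    simp only [List.map_cons, List.sum_cons, pvWeight]
    split_ifs <;> ring

theorem dimensionsAltGo_eq_sum (fuel : Nat) (basis : List String)
    (h : basis.length ≤ fuel) :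
    dimensionsAltGo fuel basis = (basis.map pvWeight).sum := by
  induction fuel generalizing basis with
  | zero =>
    rw [Nat.le_zero] at h
    simp [dimensionsAltGo, List.length_eq_zero_iff.mp h]
  | succ fuel ih =>
    rw [dimensionsAltGo]
    split_ifs with h0 h1 hT
    · simp [List.length_eq_zero_iff.mp h0]
    · obtain ⟨b, hb⟩ := List.length_eq_one_iff.mp h1
      subst hb
      simp only [List.headI, PySem.Str.pyGet?_eq, PySem.Chars.pyGet?_eq_listPyGet?] at hT
      simp [pvWeight, hT]
    · obtain ⟨b, hb⟩ := List.length_eq_one_iff.mp h1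
      subst hb
      simp only [List.headI, PySem.Str.pyGet?_eq, PySem.Chars.pyGet?_eq_listPyGet?] at hT
      simp [pvWeight, hT]
    · dsimp only
      rw [PySem.List.slice_to_natCast, PySem.List.slice_from_natCast,
        ih _ (by simp only [List.length_take]; omega),
        ih _ (by simp only [List.length_drop]; omega),
        ← List.sum_append, ← List.map_append, List.take_append_drop]

theorem dimensions_alt_eq_sum (basis : List String) :
    dimensions_alt basis = (basis.map pvWeight).sum :=
  dimensionsAltGo_eq_sum basis.length basis le_rfl

-- ===== VERDICT (by name: the statement is the Claim_ definition above) =====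
theorem dimensions_spec : Claim_equal_dimensions := by
  intro basis _ _
  unfold Spec_dimensions dimensions
  rw [dimensions_foldl, dimensions_alt_eq_sum]
  ring
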